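-- pv_equiv track=rewrite | github.com/PhyAiHao/Homemade_AI_Agent_Centaur_Psicode | agent-brain/agent_brain/voice/keyterms.py | split_identifier
-- ===== SOURCE A (Python) =====
-- def split_identifier(name: str) -> list[str]:
--     fragments = (
--         name.replace("/", " ")
--         .replace("\\", " ")
--         .replace(".", " ")
--         .replace("-", " ")
--         .replace("_", " ")
--         .replace(":", " ")
--         .split()
--     )
--     return [
--         piece
--         for fragment in fragments
--         for piece in _split_camel_case(fragment)
--         if 2 < len(piece) <= 32
--     ]
--
-- def _split_camel_case(fragment: str) -> list[str]:
--     if not fragment: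
--         return []
--     items: list[str] = []
--     current = fragment[0]
--     for char in fragment[1:]:
--         if char.isupper() and current[-1].islower():
--             items.append(current)
--             current = char
--         else:
--             current += char
--     items.append(current)
--     return [item for item in items if item]
-- ===== SOURCE B (Python) =====
-- def split_identifier(name: str) -> list[str]:
--     out: list[str] = []
--     cur = ""
--     for ch in name:
--         if ch in "/\\.-_:" or ch.isspace():
--             if 2 < len(cur) <= 32:
--                 out.append(cur)
--             cur = ""
--         elif ch.isupper() and cur and cur[-1].islower():
--             if 2 < len(cur) <= 32:
--                 out.append(cur)
--             cur = ch
--         else: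
--             cur += ch
--     if 2 < len(cur) <= 32:
--         out.append(cur)
--     return out
-- ===== Notes on version B (the rewrite author's own statement) =====
-- stated objective: alternative
-- what changed: Replaces A's six-fold replace chain + whitespace split + per-fragment camelCase splitter with a single pass over the characters maintaining a current-token accumulator that is flushed (and length-filtered) at separators and lower-to-upper boundaries.
import Mathlib
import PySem

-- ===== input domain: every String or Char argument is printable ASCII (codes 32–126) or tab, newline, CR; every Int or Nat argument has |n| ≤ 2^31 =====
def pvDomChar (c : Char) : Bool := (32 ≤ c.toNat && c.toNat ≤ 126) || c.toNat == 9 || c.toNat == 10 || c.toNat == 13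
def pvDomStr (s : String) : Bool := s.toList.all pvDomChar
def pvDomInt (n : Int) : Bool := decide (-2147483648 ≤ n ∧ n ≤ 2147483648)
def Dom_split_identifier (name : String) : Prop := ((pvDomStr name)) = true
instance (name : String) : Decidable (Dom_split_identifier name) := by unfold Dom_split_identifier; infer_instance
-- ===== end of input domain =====

-- B replaces A's replace-chain + split + per-fragment camel-split by a single pass over the
-- characters with a current-token accumulator (objective: alternative decomposition, one pass).

-- ===== PORT A =====
-- current[-1].islower() in Python: current is always nonempty there; ported totally via getLast?
def pvLastLow (cur : List Char) : Bool := (cur.getLast?.map PySem.Chars.islower).getD false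

-- literal port of _split_camel_case (strings handled as char lists via toList/ofList)
def pvSplitCamel (fragment : String) : List String :=
  match fragment.toList with
  | [] => []
  | c :: rest =>
    let st := rest.foldl
      (fun (st : List (List Char) × List Char) ch =>
        if PySem.Chars.isupper ch && pvLastLow st.2
        then (st.1 ++ [st.2], [ch]) else (st.1, st.2 ++ [ch]))
      (([] : List (List Char)), [c])
    ((st.1 ++ [st.2]).filter (fun item => !item.isEmpty)).map String.ofList

def split_identifier (name : String) : List String :=
  let fragments := PySem.Str.split₀
    (PySem.Str.replace (PySem.Str.replace (PySem.Str.replace (PySem.Str.replace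
      (PySem.Str.replace (PySem.Str.replace name "/" " ") "\\" " ") "." " ") "-" " ") "_" " ") ":" " ")
  fragments.flatMap (fun fragment =>
    (pvSplitCamel fragment).filter (fun piece =>
      decide (2 < PySem.Str.len piece) && decide (PySem.Str.len piece ≤ 32)))

-- ===== PORT B =====
def pvSep (c : Char) : Bool := ['/', '\\', '.', '-', '_', ':'].contains c

def pvFlush (cur : List Char) (out : List String) : List String :=
  if 2 < cur.length ∧ cur.length ≤ 32 then out ++ [String.ofList cur] else out

def pvStep (st : List String × List Char) (ch : Char) : List String × List Char :=
  if pvSep ch || PySem.Chars.isspace ch then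
    (pvFlush st.2 st.1, [])
  else if PySem.Chars.isupper ch && !st.2.isEmpty && pvLastLow st.2 then
    (pvFlush st.2 st.1, [ch])
  else
    (st.1, st.2 ++ [ch])

def split_identifier_alt (name : String) : List String :=
  let st := name.toList.foldl pvStep ([], [])
  pvFlush st.2 st.1

-- ===== PRECONDITION & SPEC =====
def Spec_split_identifier (name : String) (out : List String) : Prop := out = split_identifier_alt name
instance (name : String) (out : List String) : Decidable (Spec_split_identifier name out) := by unfold Spec_split_identifier; infer_instance

-- ===== CLAIM (what is proved, stated in full; the proofs are below) =====
def Claim_equal_split_identifier : Prop := ∀ (name : String), Dom_split_identifier name → Spec_split_identifier name (split_identifier name)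

-- ===== LEMMAS AND PROOFS =====
def pvBrk (c : Char) : Bool := pvSep c || PySem.Chars.isspace c
def pvSub (c : Char) : Char := if pvSep c then ' ' else c
def pvP (t : List Char) : Bool := decide (2 < t.length) && decide (t.length ≤ 32)

def pvCg (cur : List Char) : List Char → List (List Char)
  | [] => [cur]
  | c :: r => if PySem.Chars.isupper c && pvLastLow cur then cur :: pvCg [c] r else pvCg (cur ++ [c]) r

def pvCamel (frag : List Char) : List (List Char) :=
  match frag with
  | [] => []
  | c :: rest => pvCg [c] rest

def pvCore (cur : List Char) : List Char → List (List Char)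
  | [] => if cur.isEmpty then [] else [cur]
  | c :: r => if PySem.Chars.isspace c then
      (if cur.isEmpty then pvCore [] r else cur :: pvCore [] r)
    else pvCore (cur ++ [c]) r

def pvT (cur : List Char) : List Char → List (List Char)
  | [] => [cur]
  | c :: r =>
    if pvBrk c then cur :: pvT [] r
    else if PySem.Chars.isupper c && pvLastLow cur then cur :: pvT [c] r
    else pvT (cur ++ [c]) r

-- Python replace with one-char old/new is a map
theorem replace_go_single (a b : Char) : ∀ (s : List Char) (fuel : Nat) (acc : List Char),
    s.length ≤ fuel →
    PySem.Chars.replace.go [a] [b] fuel s acc = acc.reverse ++ s.map (fun c => if c = a then b else c) := by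
  intro s
  induction s with
  | nil => intro fuel acc h; cases fuel <;> simp [PySem.Chars.replace.go]
  | cons c t ih =>
      intro fuel acc h
      cases fuel with
      | zero => simp at h
      | succ f =>
        simp only [PySem.Chars.replace.go, List.isPrefixOf, List.map]
        by_cases hc : a = c
        · subst hc
          simp only [beq_self_eq_true, Bool.true_and, if_true]
          simp only [List.length_cons] at h
          simp only [List.length_cons, List.length_nil, List.drop_succ_cons, List.drop_zero]
          rw [ih f ([b].reverse ++ acc) (by omega)]
          simp
        · have : (a == c) = false := by simp [hc]
          simp only [this, Bool.false_and, Bool.false_eq_true, if_false]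
          simp only [List.length_cons] at h
          rw [ih f (c :: acc) (by omega)]
          have h3 : ¬ c = a := fun h2 => hc h2.symm
          simp [h3]

theorem replace_single (s : List Char) (a b : Char) :
    PySem.Chars.replace s [a] [b] = s.map (fun c => if c = a then b else c) := by
  simp only [PySem.Chars.replace, List.isEmpty_cons, if_false, Bool.false_eq_true]
  rw [replace_go_single a b s s.length [] (le_refl _)]
  simp

theorem chain_eq (name : String) :
    (PySem.Str.replace (PySem.Str.replace (PySem.Str.replace (PySem.Str.replace
      (PySem.Str.replace (PySem.Str.replace name "/" " ") "\\" " ") "." " ") "-" " ") "_" " ") ":" " ").toList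
      = name.toList.map pvSub := by
  simp only [PySem.Str.toList_replace]
  have e1 : ("/" : String).toList = ['/'] := rfl
  have e2 : ("\\" : String).toList = ['\\'] := rfl
  have e3 : ("." : String).toList = ['.'] := rfl
  have e4 : ("-" : String).toList = ['-'] := rfl
  have e5 : ("_" : String).toList = ['_'] := rfl
  have e6 : (":" : String).toList = [':'] := rfl
  have e7 : (" " : String).toList = [' '] := rfl
  rw [e1, e2, e3, e4, e5, e6, e7, replace_single, replace_single, replace_single,
    replace_single, replace_single, replace_single]
  simp only [List.map_map]
  refine List.map_congr_left fun c _ => ?_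
  simp only [Function.comp, pvSub, pvSep, List.contains_cons, List.elem_nil]
  split_ifs <;> simp_all

theorem split0_go_eq : ∀ (l cur : List Char) (acc : List (List Char)),
    PySem.Chars.split₀.go l cur acc = acc.reverse ++ pvCore cur.reverse l := by
  intro l
  induction l with
  | nil =>
      intro cur acc
      simp only [PySem.Chars.split₀.go, pvCore]
      by_cases h : cur.isEmpty <;> simp [h]
  | cons c r ih =>
      intro cur acc
      simp only [PySem.Chars.split₀.go, pvCore]
      by_cases hs : PySem.Chars.isspace c
      · by_cases h : cur.isEmpty
        · simp [hs, h, ih]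
        · have : cur.reverse.isEmpty = false := by simp_all
          simp [hs, h, ih, this]
      · have : cur.reverse.isEmpty = false → True := fun _ => trivial
        simp only [hs, Bool.false_eq_true, if_false]
        rw [ih (c :: cur) acc]
        simp

theorem split0_eq (l : List Char) : PySem.Chars.split₀ l = pvCore [] l := by
  rw [PySem.Chars.split₀, split0_go_eq]
  simp

theorem cg_ne_nil : ∀ (r cur : List Char), pvCg cur r ≠ [] := by
  intro r
  induction r with
  | nil => intro cur; simp [pvCg]
  | cons c r ih =>
      intro cur
      simp only [pvCg]
      split_ifs <;> simp [ih]

theorem cg_mem_ne_nil : ∀ (r cur : List Char), cur ≠ [] → ∀ t ∈ pvCg cur r, t ≠ [] := by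
  intro r
  induction r with
  | nil => intro cur h t ht; simp [pvCg] at ht; subst ht; exact h
  | cons c r ih =>
      intro cur h t ht
      simp only [pvCg] at ht
      split_ifs at ht with hb
      · rcases List.mem_cons.mp ht with h1 | h1
        · subst h1; exact h
        · exact ih [c] (by simp) t h1
      · exact ih (cur ++ [c]) (by simp) t ht

theorem dropLast_append_getLast (X : List (List Char)) (h : X ≠ []) :
    X.dropLast ++ [(X.getLast?).getD []] = X := by
  induction X with
  | nil => simp at h
  | cons a X ih =>
      cases X with
      | nil => simp
      | cons b Y =>
          simp only [List.dropLast_cons₂, List.getLast?_cons_cons, List.cons_append]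
          rw [ih (by simp)]

theorem cg_append : ∀ (u cur v : List Char),
    pvCg cur (u ++ v) = (pvCg cur u).dropLast ++ pvCg (((pvCg cur u).getLast?).getD []) v := by
  intro u
  induction u with
  | nil => intro cur v; simp [pvCg]
  | cons c u ih =>
      intro cur v
      simp only [List.cons_append, pvCg]
      split_ifs with hb
      · rw [ih [c] v]
        have hne := cg_ne_nil u [c]
        rcases List.exists_cons_of_ne_nil hne with ⟨y, Y, hY⟩
        simp [hY]
      · exact ih (cur ++ [c]) v

theorem camel_decomp (frag : List Char) (h : frag ≠ []) :
    (pvCamel frag).dropLast ++ [((pvCamel frag).getLast?).getD []] = pvCamel frag := by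
  rcases List.exists_cons_of_ne_nil h with ⟨c, rest, rfl⟩
  exact dropLast_append_getLast _ (cg_ne_nil rest [c])

theorem camel_snoc (frag : List Char) (c : Char) (h : frag ≠ []) :
    pvCamel (frag ++ [c]) =
      if PySem.Chars.isupper c && pvLastLow (((pvCamel frag).getLast?).getD []) then
        pvCamel frag ++ [[c]]
      else
        (pvCamel frag).dropLast ++ [(((pvCamel frag).getLast?).getD []) ++ [c]] := by
  rcases List.exists_cons_of_ne_nil h with ⟨f0, fr, rfl⟩
  simp only [pvCamel, List.cons_append]
  rw [cg_append fr [f0] [c]]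
  simp only [pvCg]
  split_ifs with hb
  · rw [show ([(pvCg [f0] fr).getLast?.getD [], [c]] : List (List Char))
        = [(pvCg [f0] fr).getLast?.getD []] ++ [[c]] from rfl, ← List.append_assoc,
      dropLast_append_getLast _ (cg_ne_nil fr [f0])]
  · rfl

theorem brk_eq (c : Char) : PySem.Chars.isspace (pvSub c) = pvBrk c := by
  simp only [pvSub, pvBrk]
  split_ifs with h
  · simp [h]
    decide
  · simp [h]

theorem sub_eq_of_not_brk (c : Char) (h : pvBrk c = false) : pvSub c = c := by
  simp only [pvBrk, Bool.or_eq_false_iff] at h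
  simp [pvSub, h.1]

-- main: camel-after-split equals the one-pass tokenizer (up to empty tokens)
theorem main_G : ∀ (l frag : List Char),
    (pvCore frag (l.map pvSub)).flatMap pvCamel =
      if frag.isEmpty then (pvT [] l).filter (fun t => !t.isEmpty)
      else ((pvCamel frag).dropLast ++ pvT (((pvCamel frag).getLast?).getD []) l).filter (fun t => !t.isEmpty) := by
  intro l
  induction l with
  | nil =>
      intro frag
      by_cases hf : frag.isEmpty
      · rw [List.isEmpty_iff] at hf; subst hf
        simp [pvCore, pvT]
      · simp only [hf, Bool.false_eq_true, if_false, List.map_nil, pvCore, pvT]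
        have hfne : frag ≠ [] := by simpa [List.isEmpty_iff] using hf
        rw [camel_decomp frag hfne]
        rw [List.filter_eq_self.mpr ?_]
        · simp only [List.flatMap_cons, List.flatMap_nil, List.append_nil]
        · intro t ht
          rcases List.exists_cons_of_ne_nil hfne with ⟨f0, fr, rfl⟩
          have := cg_mem_ne_nil fr [f0] (by simp) t (by simpa [pvCamel] using ht)
          simpa using this
  | cons c r ih =>
      intro frag
      simp only [List.map_cons, pvCore, brk_eq]
      by_cases hb : pvBrk c
      · by_cases hf : frag.isEmpty
        · rw [List.isEmpty_iff] at hf; subst hf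
          simp only [List.isEmpty_nil, if_true, hb]
          have h0 := ih []
          simp only [List.isEmpty_nil, if_true] at h0
          rw [h0]
          simp [pvT, hb]
        · have hfne : frag ≠ [] := by simpa [List.isEmpty_iff] using hf
          simp only [hb, if_true, hf, Bool.false_eq_true, if_false, List.flatMap_cons]
          have h0 := ih []
          simp only [List.isEmpty_nil, if_true] at h0
          rw [h0]
          simp only [pvT, hb, if_true]
          rw [show (((pvCamel frag).getLast?).getD [] :: pvT [] r)
              = [((pvCamel frag).getLast?).getD []] ++ pvT [] r from rfl,
            ← List.append_assoc, camel_decomp frag hfne, List.filter_append]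
          congr 1
          rw [List.filter_eq_self.mpr ?_]
          · intro t ht
            rcases List.exists_cons_of_ne_nil hfne with ⟨f0, fr, rfl⟩
            have := cg_mem_ne_nil fr [f0] (by simp) t (by simpa [pvCamel] using ht)
            simpa using this
      · have hsub : pvSub c = c := sub_eq_of_not_brk c (by simpa using hb)
        by_cases hf : frag.isEmpty
        · rw [List.isEmpty_iff] at hf; subst hf
          simp only [hb, Bool.false_eq_true, if_false, List.nil_append, hsub]
          have h1 := ih [c]
          simp only [List.isEmpty_cons, if_false, Bool.false_eq_true] at h1
          rw [h1]
          simp only [pvCamel, pvCg, List.dropLast_singleton, List.getLast?_singleton,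
            Option.getD_some, List.nil_append, List.isEmpty_nil, if_true]
          simp [pvT, hb, pvLastLow]
        · have hfne : frag ≠ [] := by simpa [List.isEmpty_iff] using hf
          simp only [hb, Bool.false_eq_true, if_false, hsub, hf]
          have h1 := ih (frag ++ [c])
          have : (frag ++ [c]).isEmpty = false := by simp
          simp only [this, Bool.false_eq_true, if_false] at h1
          rw [h1, camel_snoc frag c hfne]
          by_cases hcb : (PySem.Chars.isupper c && pvLastLow (((pvCamel frag).getLast?).getD [])) = true
          · simp only [hcb, if_true, List.dropLast_concat, List.getLast?_concat, Option.getD_some]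
            simp only [pvT, hb, Bool.false_eq_true, if_false, hcb, if_true]
            rw [show (((pvCamel frag).getLast?).getD [] :: pvT [c] r)
                = [((pvCamel frag).getLast?).getD []] ++ pvT [c] r from rfl,
              ← List.append_assoc, camel_decomp frag hfne]
          · simp only [hcb, if_false, Bool.false_eq_true, List.dropLast_concat,
              List.getLast?_concat, Option.getD_some]
            simp only [pvT, hb, Bool.false_eq_true, if_false, hcb]

theorem camel_foldl : ∀ (rest : List Char) (items : List (List Char)) (cur : List Char),
    (let st := rest.foldl
      (fun (st : List (List Char) × List Char) ch =>
        if PySem.Chars.isupper ch && pvLastLow st.2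
        then (st.1 ++ [st.2], [ch]) else (st.1, st.2 ++ [ch])) (items, cur)
     st.1 ++ [st.2]) = items ++ pvCg cur rest := by
  intro rest
  induction rest with
  | nil => intro items cur; simp [pvCg]
  | cons c r ih =>
      intro items cur
      simp only [List.foldl_cons, pvCg]
      split_ifs with hb
      · rw [ih (items ++ [cur]) [c]]
        simp
      · exact ih items (cur ++ [c])

theorem splitCamel_eq (frag : List Char) :
    pvSplitCamel (String.ofList frag) = ((pvCamel frag).filter (fun t => !t.isEmpty)).map String.ofList := by
  simp only [pvSplitCamel, String.toList_ofList]
  cases frag with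
  | nil => simp [pvCamel]
  | cons c rest =>
      simp only [pvCamel]
      rw [camel_foldl rest [] [c]]
      simp

theorem flatMap_comm (L : List (List Char)) :
    L.flatMap (fun frag => ((pvCamel frag).filter pvP).map String.ofList)
      = ((L.flatMap pvCamel).filter pvP).map String.ofList := by
  induction L with
  | nil => simp
  | cons a L ih => simp [List.flatMap_cons, List.filter_append, ih]

theorem flush_eq (cur : List Char) (out : List String) :
    pvFlush cur out = out ++ (([cur].filter pvP).map String.ofList) := by
  simp only [pvFlush, List.filter_cons, List.filter_nil, pvP]
  by_cases h : 2 < cur.length ∧ cur.length ≤ 32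
  · have : (decide (2 < cur.length) && decide (cur.length ≤ 32)) = true := by
      simp [h.1, h.2]
    rw [if_pos h, this]
    simp
  · have : (decide (2 < cur.length) && decide (cur.length ≤ 32)) = false := by
      rcases Decidable.not_and_iff_not_or_not.mp h with h1 | h1 <;> simp [h1]
    rw [if_neg h, this]
    simp

theorem filter_cons_split (p : List Char → Bool) (a : List Char) (l : List (List Char)) :
    List.filter p (a :: l) = List.filter p [a] ++ List.filter p l := by
  simp only [List.filter_cons, List.filter_nil]
  split_ifs <;> simp

theorem B_fold : ∀ (l : List Char) (out : List String) (cur : List Char),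
    (let st := l.foldl pvStep (out, cur); pvFlush st.2 st.1) =
      out ++ ((pvT cur l).filter pvP).map String.ofList := by
  intro l
  induction l with
  | nil =>
      intro out cur
      simp only [List.foldl_nil, pvT]
      exact flush_eq cur out
  | cons c r ih =>
      intro out cur
      simp only [List.foldl_cons, pvStep]
      by_cases hb : (pvSep c || PySem.Chars.isspace c) = true
      · simp only [hb, if_true]
        rw [ih (pvFlush cur out) []]
        have hbb : pvBrk c = true := hb
        simp only [pvT, hbb, if_true]
        rw [filter_cons_split, flush_eq]
        simp
      · have hbb : pvBrk c = false := by simpa [pvBrk] using hb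
        simp only [hb, if_false, Bool.false_eq_true]
        have hguard : (PySem.Chars.isupper c && !cur.isEmpty && pvLastLow cur)
            = (PySem.Chars.isupper c && pvLastLow cur) := by
          cases cur <;> simp [pvLastLow]
        rw [hguard]
        by_cases hcb : (PySem.Chars.isupper c && pvLastLow cur) = true
        · simp only [hcb, if_true]
          rw [ih (pvFlush cur out) [c]]
          simp only [pvT, hbb, Bool.false_eq_true, if_false, hcb, if_true]
          rw [filter_cons_split, flush_eq]
          simp
        · simp only [hcb, if_false, Bool.false_eq_true]
          rw [ih out (cur ++ [c])]
          simp only [pvT, hbb, Bool.false_eq_true, if_false, hcb]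

theorem filterP_filterNE (l : List (List Char)) :
    (l.filter (fun t => !t.isEmpty)).filter pvP = l.filter pvP := by
  induction l with
  | nil => simp
  | cons t l ih =>
      by_cases hne : t = []
      · subst hne
        have hp : pvP [] = false := by decide
        simp [hp, ih]
      · have h2 : (!t.isEmpty) = true := by simp [hne]
        by_cases hp : pvP t = true <;> simp [h2, hp, ih]

theorem A_eq (name : String) :
    split_identifier name = (((pvCore [] (name.toList.map pvSub)).flatMap pvCamel).filter pvP).map String.ofList := by
  have hpc : ∀ t : List Char,
      (decide (2 < PySem.Str.len (String.ofList t)) && decide (PySem.Str.len (String.ofList t) ≤ 32)) = pvP t := by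
    intro t
    simp only [PySem.Str.len, String.toList_ofList, pvP]
    congr 1 <;> rw [decide_eq_decide] <;> omega
  have hfun : ∀ frag : List Char,
      (pvSplitCamel (String.ofList frag)).filter
        (fun piece => decide (2 < PySem.Str.len piece) && decide (PySem.Str.len piece ≤ 32))
      = ((pvCamel frag).filter pvP).map String.ofList := by
    intro frag
    rw [splitCamel_eq, List.filter_map]
    have hcomp : ((fun piece => decide (2 < PySem.Str.len piece) && decide (PySem.Str.len piece ≤ 32))
        ∘ String.ofList) = pvP := funext hpc
    rw [hcomp, filterP_filterNE]
  simp only [split_identifier]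
  have hfrag : PySem.Str.split₀
      (PySem.Str.replace (PySem.Str.replace (PySem.Str.replace (PySem.Str.replace
        (PySem.Str.replace (PySem.Str.replace name "/" " ") "\\" " ") "." " ") "-" " ") "_" " ") ":" " ")
      = (pvCore [] (name.toList.map pvSub)).map String.ofList := by
    simp only [PySem.Str.split₀]
    rw [chain_eq, split0_eq]
  rw [hfrag, List.flatMap_map]
  simp only [hfun]
  exact flatMap_comm _

-- ===== VERDICT (by name: the statement is the Claim_ definition above) =====
theorem split_identifier_spec : Claim_equal_split_identifier := by
  intro name _
  unfold Spec_split_identifier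
  rw [A_eq]
  have hB := B_fold name.toList [] []
  simp only [split_identifier_alt]
  rw [hB]
  have h := main_G name.toList []
  simp only [List.isEmpty_nil, if_true] at h
  rw [h, filterP_filterNE]
  simp
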